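-- pv_equiv track=rewrite | github.com/kyle-eros/eros-schedule-generator | scripts/volume_optimizer.py | _get_base_volume
-- ===== SOURCE A (Python) =====
-- PAID_PAGE_CONFIG: dict[tuple[int, int | None], tuple[str, int, int]] = {
--     (0, 999): ("Base", 2, 2),  # Base tier: 2 PPV/day minimum (14/week)
--     (1000, 4999): ("Growth", 3, 2),  # Growth tier: 3 PPV/day (21/week)
--     (5000, 14999): ("Scale", 4, 3),  # Scale tier: 4 PPV/day (28/week)
--     (15000, None): ("High", 5, 4),  # High tier: 5 PPV/day (35/week)
-- }
--
-- FREE_PAGE_CONFIG: dict[tuple[int, int | None], tuple[str, int, int]] = {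
--     (0, 999): ("Base", 2, 2),  # Base tier: 2 PPV/day minimum (14/week)
--     (1000, 4999): ("Growth", 3, 2),  # Growth tier: 3 PPV/day (21/week)
--     (5000, 19999): ("Scale", 4, 3),  # Scale tier: 4 PPV/day (28/week)
--     (20000, None): ("High", 5, 4),  # High tier: 5 PPV/day (35/week)
-- }
--
-- def _get_base_volume(fan_count: int, is_free_page: bool) -> tuple[str, int, int]:
--     """
--     Get base volume from fan count brackets.
--
--     Args:
--         fan_count: Number of active fans
--         is_free_page: Whether this is a free page
--
--     Returns:
--         Tuple of (level_name, ppv_per_day, bump_per_day)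
--     """
--     config = FREE_PAGE_CONFIG if is_free_page else PAID_PAGE_CONFIG
--
--     for (min_fans, max_fans), (level, ppv, bump) in config.items():
--         if max_fans is None:
--             if fan_count >= min_fans:
--                 return (level, ppv, bump)
--         elif min_fans <= fan_count <= max_fans:
--             return (level, ppv, bump)
--
--     # Default to lowest tier
--     first_key = list(config.keys())[0]
--     return config[first_key]
-- ===== SOURCE B (Python) =====
-- TIERS = (("Base", 2, 2), ("Growth", 3, 2), ("Scale", 4, 3), ("High", 5, 4))
--
-- def _get_base_volume(fan_count: int, is_free_page: bool) -> tuple[str, int, int]: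
--     """Count how many tier lower-bounds fan_count has crossed; index the tier table."""
--     high_min = 20000 if is_free_page else 15000
--     idx = (fan_count >= 1000) + (fan_count >= 5000) + (fan_count >= high_min)
--     return TIERS[idx]
-- ===== Notes on version B (the rewrite author's own statement) =====
-- stated objective: simpler
-- what changed: Replaced the config-dict scan (ordered range checks with a fallthrough default) by arithmetic: the tier index is computed as the count of lower-bound thresholds crossed (a sum of booleans) and used to index a flat tier table; no loop, no range comparisons, no default branch.
import Mathlib
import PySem

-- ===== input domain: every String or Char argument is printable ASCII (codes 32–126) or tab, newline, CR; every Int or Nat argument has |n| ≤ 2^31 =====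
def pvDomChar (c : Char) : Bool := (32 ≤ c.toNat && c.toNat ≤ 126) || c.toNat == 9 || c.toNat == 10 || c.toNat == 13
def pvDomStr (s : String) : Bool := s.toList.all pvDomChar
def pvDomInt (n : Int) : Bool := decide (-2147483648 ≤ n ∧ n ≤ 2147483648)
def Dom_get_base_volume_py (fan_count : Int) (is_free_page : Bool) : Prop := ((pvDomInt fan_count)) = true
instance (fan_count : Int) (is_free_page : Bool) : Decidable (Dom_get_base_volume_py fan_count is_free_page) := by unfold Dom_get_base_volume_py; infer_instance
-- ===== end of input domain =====

-- B replaces A's config-dict scan with an arithmetic tier index (count of thresholds crossed)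
-- indexing a flat tier table (objective: simpler).

-- ===== PORT A =====
-- config dicts as association lists in insertion order, as in A
def pvPaidConfig : List ((Int × Option Int) × (String × Int × Int)) :=
  [((0, some 999), ("Base", 2, 2)),
   ((1000, some 4999), ("Growth", 3, 2)),
   ((5000, some 14999), ("Scale", 4, 3)),
   ((15000, none), ("High", 5, 4))]

def pvFreeConfig : List ((Int × Option Int) × (String × Int × Int)) :=
  [((0, some 999), ("Base", 2, 2)),
   ((1000, some 4999), ("Growth", 3, 2)),
   ((5000, some 19999), ("Scale", 4, 3)),
   ((20000, none), ("High", 5, 4))]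

-- the for-loop over config.items()
def pvScan (fan_count : Int) :
    List ((Int × Option Int) × (String × Int × Int)) → Option (String × Int × Int)
  | [] => none
  | ((min_fans, max_fans), v) :: rest =>
    match max_fans with
    | none => if fan_count ≥ min_fans then some v else pvScan fan_count rest
    | some mx => if min_fans ≤ fan_count ∧ fan_count ≤ mx then some v
                 else pvScan fan_count rest

def get_base_volume_py (fan_count : Int) (is_free_page : Bool) : String × Int × Int :=
  let config := if is_free_page then pvFreeConfig else pvPaidConfig
  match pvScan fan_count config with
  | some v => v
  | none =>
    -- default: config[list(config.keys())[0]]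
    match config with
    | (_, v) :: _ => v
    | [] => ("", 0, 0)  -- unreachable: both configs are nonempty

-- ===== PORT B =====
def pvTiers : List (String × Int × Int) :=
  [("Base", 2, 2), ("Growth", 3, 2), ("Scale", 4, 3), ("High", 5, 4)]

def get_base_volume_py_alt (fan_count : Int) (is_free_page : Bool) : String × Int × Int :=
  let high_min : Int := if is_free_page then 20000 else 15000
  let idx : Nat := (if fan_count ≥ 1000 then 1 else 0) + (if fan_count ≥ 5000 then 1 else 0)
                   + (if fan_count ≥ high_min then 1 else 0)
  pvTiers.getD idx ("", 0, 0)  -- idx ∈ [0,3], always in range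

-- ===== PRECONDITION & SPEC =====
def Spec_get_base_volume_py (fan_count : Int) (is_free_page : Bool) (out : String × Int × Int) : Prop := out = get_base_volume_py_alt fan_count is_free_page
instance (fan_count : Int) (is_free_page : Bool) (out : String × Int × Int) : Decidable (Spec_get_base_volume_py fan_count is_free_page out) := by unfold Spec_get_base_volume_py; infer_instance

-- ===== CLAIM (what is proved, stated in full; the proofs are below) =====
def Claim_equal_get_base_volume_py : Prop := ∀ (fan_count : Int) (is_free_page : Bool), Dom_get_base_volume_py fan_count is_free_page → Spec_get_base_volume_py fan_count is_free_page (get_base_volume_py fan_count is_free_page)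

-- ===== LEMMAS AND PROOFS =====

-- ===== VERDICT (by name: the statement is the Claim_ definition above) =====
theorem get_base_volume_py_spec : Claim_equal_get_base_volume_py := by
  intro fan_count is_free_page _
  unfold Spec_get_base_volume_py get_base_volume_py get_base_volume_py_alt
  cases is_free_page <;>
    simp only [pvPaidConfig, pvFreeConfig, pvScan, pvTiers, if_true, if_false,
      Bool.false_eq_true, List.getD] <;>
    split_ifs <;> simp_all <;> omega
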